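-- pv_equiv track=rewrite | github.com/cipherboy/hash_framework | hash_framework/algorithms/_sha1.py | sha1_build_state
-- ===== SOURCE A (Python) =====
-- def sha1_build_state(eval_table, prefix=""):
--     state = [[], [], [], [], []]
--     for i in range(0, 160):
--         name = prefix + "s" + str(i)
--         l = i//32
--         if name in eval_table:
--             state[l].append(eval_table[name])
--         else:
--             state[l].append(name)
--     return state
-- ===== SOURCE B (Python) =====
-- def sha1_build_state(eval_table, prefix=""):
--     # Inverted traversal: instead of 160 dictionary lookups, build the default
--     # flat name list once, index names to their positions, then make a single
--     # pass over eval_table writing each matching entry into place (popping the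
--     # index entry so each name is written at most once); finally cut the flat
--     # list into the five 32-bit words.
--     flat = [prefix + "s" + str(i) for i in range(160)]
--     index = {name: i for i, name in enumerate(flat)}
--     for key, value in eval_table.items():
--         i = index.pop(key, None)
--         if i is not None:
--             flat[i] = value
--     return [flat[k:k + 32] for k in range(0, 160, 32)]
-- ===== Notes on version B (the rewrite author's own statement) =====
-- stated objective: alternative
-- what changed: A performs 160 membership-test-plus-lookup passes into eval_table while appending to i//32-selected buckets; B inverts the traversal: it builds the 160 default names and a name-to-position index once, then scans eval_table itself in a single pass, popping matched names from the index and writing values into the flat array by position, and finally slices the flat array into the five words.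
import Mathlib
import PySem

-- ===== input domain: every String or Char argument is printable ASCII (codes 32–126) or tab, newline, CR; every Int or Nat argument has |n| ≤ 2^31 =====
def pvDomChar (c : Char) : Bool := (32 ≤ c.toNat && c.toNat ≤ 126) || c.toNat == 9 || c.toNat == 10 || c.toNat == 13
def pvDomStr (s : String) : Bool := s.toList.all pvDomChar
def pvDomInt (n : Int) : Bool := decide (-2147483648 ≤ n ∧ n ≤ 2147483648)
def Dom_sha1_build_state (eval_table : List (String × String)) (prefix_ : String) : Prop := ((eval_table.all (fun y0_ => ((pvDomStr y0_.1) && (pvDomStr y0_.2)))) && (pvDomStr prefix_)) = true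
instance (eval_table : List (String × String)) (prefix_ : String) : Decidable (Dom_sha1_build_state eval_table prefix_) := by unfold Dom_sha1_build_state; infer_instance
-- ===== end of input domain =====

-- B inverts the traversal: instead of A's 160 lookups into eval_table routed by i//32 into
-- buckets, B builds the flat default-name list and a name→position index once, scans
-- eval_table itself in one pass popping matched names and writing values by position, and
-- finally slices the flat list into the five words (alternative algorithm, similar cost).

-- ===== PORT A =====
-- state[l].append(v) for a nonnegative index l (Python list indexed mutation)
def pvAppendAt (state : List (List String)) (l : Nat) (v : String) : List (List String) :=
  match state, l with
  | [], _ => []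
  | w :: ws, 0 => (w ++ [v]) :: ws
  | w :: ws, Nat.succ k => w :: pvAppendAt ws k v

def sha1_build_state (eval_table : List (String × String)) (prefix_ : String) : List (List String) :=
  (PySem.List.pyRange 0 160 1).foldl
    (fun state i =>
      let name := prefix_ ++ "s" ++ PySem.Int.toStr i
      let l := PySem.Int.floordiv i 32
      match PySem.Dict.get? (PySem.Dict.mk eval_table) name with
      | some v => pvAppendAt state l.toNat v
      | none   => pvAppendAt state l.toNat name)
    [[], [], [], [], []]

-- ===== PORT B =====
-- loop body of Source B's single pass over eval_table: i = index.pop(key, None); if hit, flat[i] = value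
def pvStep (st : List String × PySem.Dict String Int) (kv : String × String) :
    List String × PySem.Dict String Int :=
  match st.2.pop? kv.1 with
  | some (i, d') => (st.1.set i.toNat kv.2, d')
  | none => st

def sha1_build_state_alt (eval_table : List (String × String)) (prefix_ : String) : List (List String) :=
  let flat := (PySem.List.pyRange 0 160 1).map (fun i => prefix_ ++ "s" ++ PySem.Int.toStr i)
  let index := (PySem.List.enumerate flat).foldl
      (fun (d : PySem.Dict String Int) p => d.insert p.2 p.1) PySem.Dict.empty
  let res := eval_table.foldl pvStep (flat, index)
  (PySem.List.pyRange 0 160 32).map (fun k => PySem.List.slice res.1 (some k) (some (k + 32)))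

-- ===== PRECONDITION & SPEC =====
def Spec_sha1_build_state (eval_table : List (String × String)) (prefix_ : String) (out : List (List String)) : Prop := out = sha1_build_state_alt eval_table prefix_
instance (eval_table : List (String × String)) (prefix_ : String) (out : List (List String)) : Decidable (Spec_sha1_build_state eval_table prefix_ out) := by unfold Spec_sha1_build_state; infer_instance

-- ===== CLAIM (what is proved, stated in full; the proofs are below) =====
def Claim_equal_sha1_build_state : Prop := ∀ (eval_table : List (String × String)) (prefix_ : String), Dom_sha1_build_state eval_table prefix_ → Spec_sha1_build_state eval_table prefix_ (sha1_build_state eval_table prefix_)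

-- ===== LEMMAS AND PROOFS =====

-- the name both programs generate for position i
def pvName (prefix_ : String) (i : Int) : String := prefix_ ++ "s" ++ PySem.Int.toStr i

-- the per-position result both programs compute
def pvF (eval_table : List (String × String)) (prefix_ : String) : Int → String := fun i =>
  ((PySem.Dict.mk eval_table).get? (pvName prefix_ i)).getD (pvName prefix_ i)

def pvFlat0 (prefix_ : String) : List String :=
  (PySem.List.pyRange 0 160 1).map (fun i => prefix_ ++ "s" ++ PySem.Int.toStr i)

def pvIdx0 (prefix_ : String) : PySem.Dict String Int :=
  (PySem.List.enumerate (pvFlat0 prefix_)).foldl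
    (fun (d : PySem.Dict String Int) p => d.insert p.2 p.1) PySem.Dict.empty

set_option maxRecDepth 10000 in
theorem pv_toStr_inj : ∀ i ∈ PySem.List.pyRange 0 160 1, ∀ j ∈ PySem.List.pyRange 0 160 1,
    PySem.Int.toStr i = PySem.Int.toStr j → i = j := by decide

theorem pv_name_inj (prefix_ : String) {i j : Int}
    (hi : 0 ≤ i) (hi' : i < 160) (hj : 0 ≤ j) (hj' : j < 160)
    (h : pvName prefix_ i = pvName prefix_ j) : i = j := by
  apply pv_toStr_inj i (by rw [PySem.List.mem_pyRange_one]; omega)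
    j (by rw [PySem.List.mem_pyRange_one]; omega)
  exact (String.append_right_inj (prefix_ ++ "s")).mp h

theorem pv_flat0_eq (prefix_ : String) :
    pvFlat0 prefix_ = ((PySem.List.pyRange 0 160 1).map PySem.Int.toStr).map
      (fun s => (prefix_ ++ "s") ++ s) := by
  rw [pvFlat0, List.map_map]
  rfl

set_option maxRecDepth 10000 in
theorem pv_flat0_nodup (prefix_ : String) : (pvFlat0 prefix_).Nodup := by
  rw [pv_flat0_eq]
  apply List.Nodup.map
  · intro a b hab
    exact (String.append_right_inj (prefix_ ++ "s")).mp hab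
  · decide

theorem pv_flat0_len (prefix_ : String) : (pvFlat0 prefix_).length = 160 := by
  simp [pvFlat0, PySem.List.length_pyRange_one]

theorem pv_flat0_get (prefix_ : String) (j : Nat) (hj : j < 160) :
    (pvFlat0 prefix_)[j]'(by rw [pv_flat0_len]; omega) = pvName prefix_ (j : Int) := by
  simp only [pvFlat0, List.getElem_map, pvName]
  rw [PySem.List.getElem_pyRange_one]
  norm_num

theorem pv_flat0_get? (prefix_ : String) (j : Nat) (hj : j < 160) :
    (pvFlat0 prefix_)[j]? = some (pvName prefix_ (j : Int)) := by
  rw [List.getElem?_eq_getElem (by rw [pv_flat0_len]; omega)]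
  rw [pv_flat0_get prefix_ j hj]

theorem pv_idx0_items (prefix_ : String) :
    (pvIdx0 prefix_).items =
      (PySem.List.enumerate (pvFlat0 prefix_)).map (fun p => (p.2, p.1)) := by
  have h := PySem.Dict.items_foldl_insert_fresh
      (l := PySem.List.enumerate (pvFlat0 prefix_)) (k := fun p => p.2) (v := fun p => p.1)
      (d := PySem.Dict.empty)
      (by intro a _; simp [PySem.Dict.contains_empty])
      (by rw [PySem.List.map_snd_enumerate]; exact pv_flat0_nodup prefix_)
  simpa [pvIdx0, PySem.Dict.empty] using h

theorem pv_idx0_keys_nodup (prefix_ : String) : (pvIdx0 prefix_).keys.Nodup := by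
  have hk : (pvIdx0 prefix_).keys = pvFlat0 prefix_ := by
    simp [PySem.Dict.keys, pv_idx0_items, List.map_map, Function.comp_def,
      PySem.List.map_snd_enumerate]
  rw [hk]; exact pv_flat0_nodup prefix_

theorem pv_idx0_get_name (prefix_ : String) (j : Nat) (hj : j < 160) :
    (pvIdx0 prefix_).get? (pvName prefix_ (j : Int)) = some (j : Int) := by
  apply PySem.Dict.get?_of_mem_items _ _ (pv_idx0_keys_nodup prefix_)
  rw [pv_idx0_items]
  refine List.mem_map.mpr ⟨((j : Int), pvName prefix_ (j : Int)), ?_, rfl⟩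
  rw [PySem.List.mem_enumerate_iff]
  exact ⟨j, by rw [pv_flat0_len]; omega, by rw [pv_flat0_get prefix_ j hj]; simp⟩

theorem pv_idx0_sound (prefix_ : String) (k : String) (i : Int)
    (h : (pvIdx0 prefix_).get? k = some i) :
    0 ≤ i ∧ i < 160 ∧ k = pvName prefix_ i := by
  have hm := PySem.Dict.mem_items_of_get?_eq_some _ h
  rw [pv_idx0_items] at hm
  obtain ⟨p, hp, hpe⟩ := List.mem_map.mp hm
  rw [PySem.List.mem_enumerate_iff] at hp
  obtain ⟨n, hn, rfl⟩ := hp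
  rw [Prod.ext_iff] at hpe
  obtain ⟨hk1, hi1⟩ := hpe
  simp only [zero_add] at hk1 hi1
  have hn160 : n < 160 := by rw [pv_flat0_len] at hn; omega
  subst hi1
  refine ⟨by omega, by omega, ?_⟩
  rw [← hk1]
  exact pv_flat0_get prefix_ n hn160

-- get? after erase (PySem.Dict carries no erase lookup lemma)
theorem pv_get?_erase {ν : Type} (d : PySem.Dict String ν) (k k' : String) :
    (d.erase k).get? k' = if k' = k then none else d.get? k' := by
  by_cases hkk : k' = k
  · subst hkk
    simp only [PySem.Dict.erase, PySem.Dict.get?]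
    have hnone : List.find? (fun p => p.1 == k') (List.filter (fun p => !p.1 == k') d.items)
        = none := by
      rw [List.find?_eq_none]
      intro x hx
      have h2 := (List.mem_filter.mp hx).2
      simp at h2 ⊢
      exact h2
    rw [hnone]; rfl
  · simp only [PySem.Dict.erase, PySem.Dict.get?, if_neg hkk]
    congr 1
    induction d.items with
    | nil => rfl
    | cons p rest ih =>
      rw [List.filter_cons]
      by_cases hp : p.1 = k'
      · have h1 : (!(p.1 == k)) = true := by
          simp only [Bool.not_eq_true', beq_eq_false_iff_ne]
          rw [hp]; exact fun h => hkk h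
        rw [h1, if_pos rfl, List.find?_cons, List.find?_cons]
        simp [hp]
      · cases h1 : (!(p.1 == k)) with
        | true =>
          rw [if_pos rfl, List.find?_cons, List.find?_cons]
          have h2 : (p.1 == k') = false := by simp [hp]
          rw [h2]
          exact ih
        | false =>
          rw [if_neg (by simp)]
          rw [ih, List.find?_cons]
          have h2 : (p.1 == k') = false := by simp [hp]
          rw [h2]

theorem pv_fold_len (tbl : List (String × String)) (st : List String × PySem.Dict String Int) :
    ((tbl.foldl pvStep st).1).length = st.1.length := by
  induction tbl generalizing st with
  | nil => rfl
  | cons kv rest ih =>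
    rw [List.foldl_cons, ih]
    unfold pvStep
    cases h : st.2.pop? kv.1 with
    | none => rfl
    | some p => simp

theorem pv_fold_get (prefix_ : String) (tbl : List (String × String)) :
    ∀ (flat : List String) (idx : PySem.Dict String Int),
      flat.length = 160 →
      (∀ k i, idx.get? k = some i → 0 ≤ i ∧ i < 160 ∧ k = pvName prefix_ i) →
      ∀ (j : Nat), j < 160 →
        ((tbl.foldl pvStep (flat, idx)).1)[j]? =
          if (idx.get? (pvName prefix_ (j : Int))).isSome
          then (flat[j]?).map
                 (fun w => ((PySem.Dict.mk tbl).get? (pvName prefix_ (j : Int))).getD w)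
          else flat[j]? := by
  induction tbl with
  | nil =>
    intro flat idx hlen hidx j hj
    have hmk : (PySem.Dict.mk ([] : List (String × String))).get?
        (pvName prefix_ (j : Int)) = none := by
      simp [PySem.Dict.get?]
    rw [List.foldl_nil, hmk]
    split
    · simp
    · rfl
  | cons kv rest ih =>
    intro flat idx hlen hidx j hj
    rw [List.foldl_cons]
    cases h1 : idx.get? kv.1 with
    | none =>
      have hstep : pvStep (flat, idx) kv = (flat, idx) := by
        simp [pvStep, PySem.Dict.pop?, h1]
      rw [hstep, ih flat idx hlen hidx j hj]
      cases h2 : idx.get? (pvName prefix_ (j : Int)) with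
      | none => simp
      | some i =>
        have hne : kv.1 ≠ pvName prefix_ (j : Int) := by
          intro he
          rw [he, h2] at h1
          cases h1
        rw [PySem.Dict.get?_mk_cons]
        simp only [Option.isSome_some, if_true, beq_iff_eq, hne, if_false]
    | some i =>
      obtain ⟨h0i, h160i, hki⟩ := hidx kv.1 i h1
      have hstep : pvStep (flat, idx) kv = (flat.set i.toNat kv.2, idx.erase kv.1) := by
        simp [pvStep, PySem.Dict.pop?, h1]
      have hlen' : (flat.set i.toNat kv.2).length = 160 := by simp [hlen]
      have hidx' : ∀ k' i', (idx.erase kv.1).get? k' = some i' →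
          0 ≤ i' ∧ i' < 160 ∧ k' = pvName prefix_ i' := by
        intro k' i' h'
        rw [pv_get?_erase] at h'
        by_cases hk : k' = kv.1
        · simp [hk] at h'
        · simp only [hk, if_false] at h'
          exact hidx k' i' h'
      rw [hstep, ih _ _ hlen' hidx' j hj]
      by_cases hji : (j : Int) = i
      · -- this position is written now and its index entry is popped
        have hkj : kv.1 = pvName prefix_ (j : Int) := by rw [hji]; exact hki
        have herase : (idx.erase kv.1).get? (pvName prefix_ (j : Int)) = none := by
          rw [pv_get?_erase]; simp [hkj]
        have hset : (flat.set i.toNat kv.2)[j]? = some kv.2 := by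
          rw [List.getElem?_set]
          have hij : i.toNat = j := by omega
          simp [hij, hlen, hj]
        have hgj : idx.get? (pvName prefix_ (j : Int)) = some i := hkj ▸ h1
        rw [herase, hgj, PySem.Dict.get?_mk_cons]
        simp only [Option.isSome_none, Bool.false_eq_true, if_false, hset,
          Option.isSome_some, if_true, hkj, beq_self_eq_true]
        rw [List.getElem?_eq_getElem (by omega : j < flat.length)]
        rfl
      · -- an unrelated position: nothing changes for j
        have hkj : kv.1 ≠ pvName prefix_ (j : Int) := by
          intro he
          have hnm : pvName prefix_ (j : Int) = pvName prefix_ i := by rw [← he, hki]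
          exact hji (pv_name_inj prefix_ (by omega) (by omega) h0i h160i hnm)
        have herase : (idx.erase kv.1).get? (pvName prefix_ (j : Int)) =
            idx.get? (pvName prefix_ (j : Int)) := by
          rw [pv_get?_erase]; simp [Ne.symm hkj]
        have hset : (flat.set i.toNat kv.2)[j]? = flat[j]? := by
          rw [List.getElem?_set]
          have hij : ¬ i.toNat = j := by omega
          simp [hij]
        rw [herase, hset, PySem.Dict.get?_mk_cons]
        simp only [beq_iff_eq, hkj, if_false]

-- the flat list B computes is exactly the per-position results
theorem pv_res_eq (eval_table : List (String × String)) (prefix_ : String) :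
    (eval_table.foldl pvStep (pvFlat0 prefix_, pvIdx0 prefix_)).1 =
      (PySem.List.pyRange 0 160 1).map (pvF eval_table prefix_) := by
  apply List.ext_getElem?
  intro n
  by_cases hn : n < 160
  · rw [pv_fold_get prefix_ eval_table _ _ (pv_flat0_len prefix_) (pv_idx0_sound prefix_) n hn]
    rw [pv_idx0_get_name prefix_ n hn]
    simp only [Option.isSome_some, if_true]
    rw [pv_flat0_get? prefix_ n hn]
    rw [List.getElem?_eq_getElem (by simp [PySem.List.length_pyRange_one]; omega)]
    rw [List.getElem_map, PySem.List.getElem_pyRange_one]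
    simp [pvF]
  · rw [List.getElem?_eq_none, List.getElem?_eq_none]
    · simp [PySem.List.length_pyRange_one]; omega
    · rw [pv_fold_len, pv_flat0_len]; omega

-- Invariant of A's fold: with five explicit rows, folding appends routed by i/32
-- appends exactly the filtered block to each row.
theorem pv_fold_rows (f : Int → String) (is : List Int)
    (h : ∀ i ∈ is, 0 ≤ i ∧ i < 160) (r0 r1 r2 r3 r4 : List String) :
    is.foldl (fun st i => pvAppendAt st (i / 32).toNat (f i)) [r0, r1, r2, r3, r4]
      = [r0 ++ (is.filter (fun i => i / 32 = 0)).map f,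
         r1 ++ (is.filter (fun i => i / 32 = 1)).map f,
         r2 ++ (is.filter (fun i => i / 32 = 2)).map f,
         r3 ++ (is.filter (fun i => i / 32 = 3)).map f,
         r4 ++ (is.filter (fun i => i / 32 = 4)).map f] := by
  induction is generalizing r0 r1 r2 r3 r4 with
  | nil => simp
  | cons i is ih =>
    have hi := h i (List.mem_cons_self ..)
    have h' : ∀ j ∈ is, 0 ≤ j ∧ j < 160 := fun j hj => h j (List.mem_cons_of_mem _ hj)
    have hb : i / 32 = 0 ∨ i / 32 = 1 ∨ i / 32 = 2 ∨ i / 32 = 3 ∨ i / 32 = 4 := by omega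
    rcases hb with hb | hb | hb | hb | hb <;>
      simp [List.foldl_cons, hb, pvAppendAt, ih h', List.append_assoc]

-- ===== VERDICT (by name: the statement is the Claim_ definition above) =====
set_option maxRecDepth 8000 in
theorem sha1_build_state_spec : Claim_equal_sha1_build_state := by
  intro eval_table prefix_ _
  show sha1_build_state eval_table prefix_ = sha1_build_state_alt eval_table prefix_
  -- A's fold is the bucketed append of pvF
  have hstep : sha1_build_state eval_table prefix_
      = (PySem.List.pyRange 0 160 1).foldl
          (fun st i => pvAppendAt st (i / 32).toNat (pvF eval_table prefix_ i))
          [[], [], [], [], []] := by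
    unfold sha1_build_state
    apply PySem.List.foldl_congr_mem
    intro st i hmem
    have h0 : 0 ≤ i ∧ i < 160 := by
      rw [PySem.List.mem_pyRange_one] at hmem; omega
    rw [PySem.Int.floordiv_eq_ediv_of_pos (by norm_num)]
    simp only [pvF, pvName]
    cases PySem.Dict.get? (PySem.Dict.mk eval_table) (prefix_ ++ "s" ++ PySem.Int.toStr i) <;> rfl
  have hmem : ∀ i ∈ PySem.List.pyRange 0 160 1, 0 ≤ i ∧ i < 160 := by
    intro i hi
    rw [PySem.List.mem_pyRange_one] at hi
    omega
  -- each filtered bucket is a contiguous block of the flat range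
  have e0 : (PySem.List.pyRange 0 160 1).filter (fun i => i / 32 = 0)
      = ((PySem.List.pyRange 0 160 1).drop 0).take 32 := by decide
  have e1 : (PySem.List.pyRange 0 160 1).filter (fun i => i / 32 = 1)
      = ((PySem.List.pyRange 0 160 1).drop 32).take 32 := by decide
  have e2 : (PySem.List.pyRange 0 160 1).filter (fun i => i / 32 = 2)
      = ((PySem.List.pyRange 0 160 1).drop 64).take 32 := by decide
  have e3 : (PySem.List.pyRange 0 160 1).filter (fun i => i / 32 = 3)
      = ((PySem.List.pyRange 0 160 1).drop 96).take 32 := by decide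
  have e4 : (PySem.List.pyRange 0 160 1).filter (fun i => i / 32 = 4)
      = ((PySem.List.pyRange 0 160 1).drop 128).take 32 := by decide
  -- B is the sliced flat result
  have hB : sha1_build_state_alt eval_table prefix_
      = (PySem.List.pyRange 0 160 32).map (fun k =>
          PySem.List.slice ((PySem.List.pyRange 0 160 1).map (pvF eval_table prefix_))
            (some k) (some (k + 32))) := by
    show (PySem.List.pyRange 0 160 32).map (fun k =>
        PySem.List.slice (eval_table.foldl pvStep (pvFlat0 prefix_, pvIdx0 prefix_)).1
          (some k) (some (k + 32))) = _
    rw [pv_res_eq]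
  have h32 : PySem.List.pyRange 0 160 32 = [0, 32, 64, 96, 128] := by decide
  have hslice : ∀ a b : Int, 0 ≤ a → 0 ≤ b →
      PySem.List.slice ((PySem.List.pyRange 0 160 1).map (pvF eval_table prefix_))
        (some a) (some b)
      = ((((PySem.List.pyRange 0 160 1).drop a.toNat).take (b.toNat - a.toNat)).map
          (pvF eval_table prefix_)) := by
    intro a b ha hb
    rw [PySem.List.slice_toNat _ ha hb, ← List.map_drop, ← List.map_take]
  rw [hstep, pv_fold_rows (pvF eval_table prefix_) _ hmem, e0, e1, e2, e3, e4, hB, h32]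
  simp only [List.map_cons, List.map_nil, List.nil_append]
  rw [hslice 0 (0+32) (by norm_num) (by norm_num), hslice 32 (32+32) (by norm_num) (by norm_num),
      hslice 64 (64+32) (by norm_num) (by norm_num), hslice 96 (96+32) (by norm_num) (by norm_num),
      hslice 128 (128+32) (by norm_num) (by norm_num)]
  rfl
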